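-- pv_equiv track=rewrite | github.com/jorismak/convert_nvfp4 | convert_nvfp4.py | detect_model_type
-- ===== SOURCE A (Python) =====
-- from typing import Dict, List, Optional, Set, Tuple
--
-- def detect_model_type(tensor_names: List[str]) -> Optional[str]:
--     """
--     Detect the model type from tensor names.
--
--     Args:
--         tensor_names: List of tensor names in the model
--
--     Returns:
--         Detected model type or None
--     """
--     tensor_set = set(tensor_names)
--
--     # Wan model detection (same logic as ComfyUI's model_detection.py)
--     if any("head.modulation" in n for n in tensor_names):
--         # It's a Wan model
--         if any("vace_patch_embedding" in n for n in tensor_names):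
--             return "wan_vace"
--         elif any("control_adapter.conv" in n for n in tensor_names):
--             if any("img_emb.proj.0" in n for n in tensor_names):
--                 return "wan_camera"
--             else:
--                 return "wan_camera_2.2"
--         elif any("casual_audio_encoder" in n for n in tensor_names):
--             return "wan_s2v"
--         elif any("audio_proj.audio_proj_glob" in n for n in tensor_names):
--             return "wan_humo"
--         elif any("face_adapter.fuser_blocks" in n for n in tensor_names):
--             return "wan_animate"
--         elif any("img_emb.proj.0" in n for n in tensor_names):
--             return "wan_i2v"
--         else:
--             return "wan_t2v"
--
--     # Qwen Image model detection (same logic as ComfyUI's model_detection.py)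
--     if any("txt_norm.weight" in n for n in tensor_names):
--         # It's a Qwen Image model
--         if any("__index_timestep_zero__" in n for n in tensor_names):
--             # Edit model (2511 - Nov 2025)
--             return "qwen_image_edit_2511"
--         elif any(
--             "time_text_embed.addition_t_embedding.weight" in n for n in tensor_names
--         ):
--             # Layered model variant
--             return "qwen_image_layered"
--         else:
--             # Standard Qwen Image (2512 - Dec 2025)
--             return "qwen_image_2512"
--
--     return None
-- ===== SOURCE B (Python) =====
-- from typing import List, Optional
--
-- def detect_model_type(tensor_names: List[str]) -> Optional[str]:
--     # Single pass: gather presence flags for every marker substring, then branch.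
--     has_modulation = False
--     has_vace = False
--     has_control_adapter = False
--     has_img_emb = False
--     has_audio_enc = False
--     has_audio_proj = False
--     has_face_adapter = False
--     has_txt_norm = False
--     has_index_ts_zero = False
--     has_addition_t = False
--     for n in tensor_names:
--         if "head.modulation" in n:
--             has_modulation = True
--         if "vace_patch_embedding" in n:
--             has_vace = True
--         if "control_adapter.conv" in n:
--             has_control_adapter = True
--         if "img_emb.proj.0" in n:
--             has_img_emb = True
--         if "casual_audio_encoder" in n:
--             has_audio_enc = True
--         if "audio_proj.audio_proj_glob" in n:
--             has_audio_proj = True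
--         if "face_adapter.fuser_blocks" in n:
--             has_face_adapter = True
--         if "txt_norm.weight" in n:
--             has_txt_norm = True
--         if "__index_timestep_zero__" in n:
--             has_index_ts_zero = True
--         if "time_text_embed.addition_t_embedding.weight" in n:
--             has_addition_t = True
--
--     if has_modulation:
--         if has_vace:
--             return "wan_vace"
--         elif has_control_adapter:
--             return "wan_camera" if has_img_emb else "wan_camera_2.2"
--         elif has_audio_enc:
--             return "wan_s2v"
--         elif has_audio_proj:
--             return "wan_humo"
--         elif has_face_adapter:
--             return "wan_animate"
--         elif has_img_emb:
--             return "wan_i2v"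
--         else:
--             return "wan_t2v"
--
--     if has_txt_norm:
--         if has_index_ts_zero:
--             return "qwen_image_edit_2511"
--         elif has_addition_t:
--             return "qwen_image_layered"
--         else:
--             return "qwen_image_2512"
--
--     return None
-- ===== Notes on version B (the rewrite author's own statement) =====
-- stated objective: simpler
-- what changed: Replaces the ~10 repeated any(... in n for n in tensor_names) scans with one explicit pass over the list that records a boolean presence flag per marker substring, followed by a pure branch tree over the flags.
import Mathlib
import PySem

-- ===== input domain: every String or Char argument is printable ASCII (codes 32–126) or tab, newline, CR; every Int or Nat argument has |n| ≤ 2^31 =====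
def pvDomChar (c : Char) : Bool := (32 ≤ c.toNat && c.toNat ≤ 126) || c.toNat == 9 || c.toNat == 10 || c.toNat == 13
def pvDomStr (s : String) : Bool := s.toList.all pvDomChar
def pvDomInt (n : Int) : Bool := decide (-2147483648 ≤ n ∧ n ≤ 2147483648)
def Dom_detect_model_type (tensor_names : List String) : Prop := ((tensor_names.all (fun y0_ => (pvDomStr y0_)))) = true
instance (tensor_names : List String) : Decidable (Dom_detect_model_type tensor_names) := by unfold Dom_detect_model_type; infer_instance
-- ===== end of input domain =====

-- ===== PORT A =====
-- A builds an unused tensor_set and then rescans tensor_names with one `any` per marker substring.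
def detect_model_type (tensor_names : List String) : Option String :=
  let _tensor_set := PySem.Set.ofList tensor_names
  if tensor_names.any (fun n => PySem.Str.isIn "head.modulation" n) then
    if tensor_names.any (fun n => PySem.Str.isIn "vace_patch_embedding" n) then
      some "wan_vace"
    else if tensor_names.any (fun n => PySem.Str.isIn "control_adapter.conv" n) then
      if tensor_names.any (fun n => PySem.Str.isIn "img_emb.proj.0" n) then
        some "wan_camera"
      else
        some "wan_camera_2.2"
    else if tensor_names.any (fun n => PySem.Str.isIn "casual_audio_encoder" n) then
      some "wan_s2v"
    else if tensor_names.any (fun n => PySem.Str.isIn "audio_proj.audio_proj_glob" n) then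
      some "wan_humo"
    else if tensor_names.any (fun n => PySem.Str.isIn "face_adapter.fuser_blocks" n) then
      some "wan_animate"
    else if tensor_names.any (fun n => PySem.Str.isIn "img_emb.proj.0" n) then
      some "wan_i2v"
    else
      some "wan_t2v"
  else if tensor_names.any (fun n => PySem.Str.isIn "txt_norm.weight" n) then
    if tensor_names.any (fun n => PySem.Str.isIn "__index_timestep_zero__" n) then
      some "qwen_image_edit_2511"
    else if tensor_names.any (fun n => PySem.Str.isIn "time_text_embed.addition_t_embedding.weight" n) then
      some "qwen_image_layered"
    else
      some "qwen_image_2512"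
  else
    none

-- ===== PORT B =====
-- B: one pass over tensor_names collecting a presence flag per marker substring, then a pure branch tree.
structure DmtFlags where
  modulation : Bool
  vace : Bool
  controlAdapter : Bool
  imgEmb : Bool
  audioEnc : Bool
  audioProj : Bool
  faceAdapter : Bool
  txtNorm : Bool
  indexTsZero : Bool
  additionT : Bool
deriving DecidableEq, Repr

def dmtStep (st : DmtFlags) (n : String) : DmtFlags :=
  { modulation := if PySem.Str.isIn "head.modulation" n then true else st.modulation
    vace := if PySem.Str.isIn "vace_patch_embedding" n then true else st.vace
    controlAdapter := if PySem.Str.isIn "control_adapter.conv" n then true else st.controlAdapter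
    imgEmb := if PySem.Str.isIn "img_emb.proj.0" n then true else st.imgEmb
    audioEnc := if PySem.Str.isIn "casual_audio_encoder" n then true else st.audioEnc
    audioProj := if PySem.Str.isIn "audio_proj.audio_proj_glob" n then true else st.audioProj
    faceAdapter := if PySem.Str.isIn "face_adapter.fuser_blocks" n then true else st.faceAdapter
    txtNorm := if PySem.Str.isIn "txt_norm.weight" n then true else st.txtNorm
    indexTsZero := if PySem.Str.isIn "__index_timestep_zero__" n then true else st.indexTsZero
    additionT := if PySem.Str.isIn "time_text_embed.addition_t_embedding.weight" n then true else st.additionT }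

def dmtInit : DmtFlags :=
  { modulation := false, vace := false, controlAdapter := false, imgEmb := false,
    audioEnc := false, audioProj := false, faceAdapter := false, txtNorm := false,
    indexTsZero := false, additionT := false }

def detect_model_type_alt (tensor_names : List String) : Option String :=
  let st := tensor_names.foldl dmtStep dmtInit
  if st.modulation then
    if st.vace then some "wan_vace"
    else if st.controlAdapter then
      if st.imgEmb then some "wan_camera" else some "wan_camera_2.2"
    else if st.audioEnc then some "wan_s2v"
    else if st.audioProj then some "wan_humo"
    else if st.faceAdapter then some "wan_animate"
    else if st.imgEmb then some "wan_i2v"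
    else some "wan_t2v"
  else if st.txtNorm then
    if st.indexTsZero then some "qwen_image_edit_2511"
    else if st.additionT then some "qwen_image_layered"
    else some "qwen_image_2512"
  else none

-- ===== PRECONDITION & SPEC =====
def Spec_detect_model_type (tensor_names : List String) (out : Option String) : Prop := out = detect_model_type_alt tensor_names
instance (tensor_names : List String) (out : Option String) : Decidable (Spec_detect_model_type tensor_names out) := by unfold Spec_detect_model_type; infer_instance

-- ===== CLAIM (what is proved, stated in full; the proofs are below) =====
def Claim_equal_detect_model_type : Prop := ∀ (tensor_names : List String), Dom_detect_model_type tensor_names → Spec_detect_model_type tensor_names (detect_model_type tensor_names)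

-- ===== LEMMAS AND PROOFS =====

theorem dmtFold_spec (xs : List String) (st : DmtFlags) :
    xs.foldl dmtStep st =
      { modulation := st.modulation || xs.any (fun n => PySem.Str.isIn "head.modulation" n)
        vace := st.vace || xs.any (fun n => PySem.Str.isIn "vace_patch_embedding" n)
        controlAdapter := st.controlAdapter || xs.any (fun n => PySem.Str.isIn "control_adapter.conv" n)
        imgEmb := st.imgEmb || xs.any (fun n => PySem.Str.isIn "img_emb.proj.0" n)
        audioEnc := st.audioEnc || xs.any (fun n => PySem.Str.isIn "casual_audio_encoder" n)
        audioProj := st.audioProj || xs.any (fun n => PySem.Str.isIn "audio_proj.audio_proj_glob" n)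
        faceAdapter := st.faceAdapter || xs.any (fun n => PySem.Str.isIn "face_adapter.fuser_blocks" n)
        txtNorm := st.txtNorm || xs.any (fun n => PySem.Str.isIn "txt_norm.weight" n)
        indexTsZero := st.indexTsZero || xs.any (fun n => PySem.Str.isIn "__index_timestep_zero__" n)
        additionT := st.additionT || xs.any (fun n => PySem.Str.isIn "time_text_embed.addition_t_embedding.weight" n) } := by
  induction xs generalizing st with
  | nil => simp
  | cons x xs ih =>
    simp only [List.foldl_cons, List.any_cons, ih]
    simp only [dmtStep]
    congr 1 <;> (split <;> simp_all)

-- ===== VERDICT (by name: the statement is the Claim_ definition above) =====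
theorem detect_model_type_spec : Claim_equal_detect_model_type := by
  intro tensor_names _
  unfold Spec_detect_model_type detect_model_type detect_model_type_alt
  rw [dmtFold_spec]
  simp [dmtInit]
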